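-- pv_equiv track=rewrite | github.com/foggieding/1000MonkeyGenome | process_maf.py | mafBlocks
-- ===== SOURCE A (Python) =====
-- def mafBlocks(beg1, beg2, seq1, seq2):
--     '''Get the gapless blocks of an alignment, from MAF format.'''
--     '''mafBlocks()输出的内容为maf中没有gap的1to1 alignment的interval，格式是物种1的start位点，物种2的start位点以及物种1和物种2无gap alignment的size'''
--     size = 0
--     for x, y in zip(seq1, seq2):
--         if x == "-":
--             if size:
--                 yield beg1, beg2, size
--                 beg1 += size
--                 beg2 += size
--                 size = 0
--             beg2 += 1
--         elif y == "-":
--             if size: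
--                 yield beg1, beg2, size
--                 beg1 += size
--                 beg2 += size
--                 size = 0
--             beg1 += 1
--         else:
--             size += 1
--     if size: yield beg1, beg2, size
-- ===== SOURCE B (Python) =====
-- def mafBlocks(beg1, beg2, seq1, seq2):
--     '''Get the gapless blocks of an alignment, from MAF format.'''
--     cols = list(zip(seq1, seq2))
--     n = len(cols)
--     i = 0
--     while i < n:
--         j = i
--         if cols[i][0] != '-' and cols[i][1] != '-':
--             while j < n and cols[j][0] != '-' and cols[j][1] != '-':
--                 j += 1
--             length = j - i
--             yield beg1, beg2, length
--             beg1 += length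
--             beg2 += length
--         else:
--             g2 = 0
--             while j < n and (cols[j][0] == '-' or cols[j][1] == '-'):
--                 if cols[j][0] == '-':
--                     g2 += 1
--                 j += 1
--             beg1 += (j - i) - g2
--             beg2 += g2
--         i = j
-- ===== Notes on version B (the rewrite author's own statement) =====
-- stated objective: alternative
-- what changed: Replaces the per-column size-accumulator-and-flush state machine with run materialization: scan maximal gapless / gapped runs of the zipped columns, emit one block per gapless run, and advance beg1/beg2 by per-run column counts for gapped runs.
import Mathlib
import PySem

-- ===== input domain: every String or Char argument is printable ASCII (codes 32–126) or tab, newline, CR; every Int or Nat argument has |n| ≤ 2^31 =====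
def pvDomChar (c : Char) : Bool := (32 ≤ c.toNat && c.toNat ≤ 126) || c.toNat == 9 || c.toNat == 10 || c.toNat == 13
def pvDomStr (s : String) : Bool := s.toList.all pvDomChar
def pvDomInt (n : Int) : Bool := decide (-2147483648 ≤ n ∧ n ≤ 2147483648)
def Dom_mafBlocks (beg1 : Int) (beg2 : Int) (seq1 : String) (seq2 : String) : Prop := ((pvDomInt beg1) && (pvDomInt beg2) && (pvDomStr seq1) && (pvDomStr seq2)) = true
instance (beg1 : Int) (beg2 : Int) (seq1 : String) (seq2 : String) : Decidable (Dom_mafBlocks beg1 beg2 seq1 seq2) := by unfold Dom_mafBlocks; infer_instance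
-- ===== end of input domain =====

-- B replaces A's per-column size-accumulator state machine by run materialization
-- (scan maximal gapless/gapped runs, one block per gapless run): alternative decomposition, same cost.

-- ===== PORT A =====
-- A's loop over zip(seq1, seq2) with the size accumulator, step for step.
def pvGoA (b1 b2 size : Int) : List (Char × Char) → List (Int × Int × Int)
  | [] => if size ≠ 0 then [(b1, b2, size)] else []
  | (x, y) :: t =>
    if x = '-' then
      if size ≠ 0 then (b1, b2, size) :: pvGoA (b1 + size) (b2 + size + 1) 0 t
      else pvGoA b1 (b2 + 1) 0 t
    else if y = '-' then
      if size ≠ 0 then (b1, b2, size) :: pvGoA (b1 + size + 1) (b2 + size) 0 t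
      else pvGoA (b1 + 1) b2 0 t
    else pvGoA b1 b2 (size + 1) t

def mafBlocks (beg1 : Int) (beg2 : Int) (seq1 : String) (seq2 : String) : List (Int × Int × Int) :=
  pvGoA beg1 beg2 0 (seq1.toList.zip seq2.toList)

-- ===== PORT B =====
-- B's run scanner: a column is "gapless" iff neither side is '-'.
def pvKey (p : Char × Char) : Bool := (p.1 != '-') && (p.2 != '-')

-- Source B's outer while loop: each iteration consumes one maximal run (the inner while scans it).
def pvGoB : Int → Int → List (Char × Char) → List (Int × Int × Int)
  | _, _, [] => []
  | b1, b2, p :: t =>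
    if pvKey p then
      let len : Int := (p :: t.takeWhile pvKey).length
      (b1, b2, len) :: pvGoB (b1 + len) (b2 + len) (t.dropWhile pvKey)
    else
      let run := p :: t.takeWhile (fun q => !pvKey q)
      let g2 : Int := run.countP (fun q => q.1 == '-')
      pvGoB (b1 + ((run.length : Int) - g2)) (b2 + g2) (t.dropWhile (fun q => !pvKey q))
termination_by _ _ l => l.length
decreasing_by
  all_goals simp only [List.length_cons]
  all_goals exact Nat.lt_succ_of_le (List.length_dropWhile_le _ _)

def mafBlocks_alt (beg1 : Int) (beg2 : Int) (seq1 : String) (seq2 : String) : List (Int × Int × Int) :=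
  pvGoB beg1 beg2 (seq1.toList.zip seq2.toList)

-- ===== PRECONDITION & SPEC =====
def Spec_mafBlocks (beg1 : Int) (beg2 : Int) (seq1 : String) (seq2 : String) (out : List (Int × Int × Int)) : Prop := out = mafBlocks_alt beg1 beg2 seq1 seq2
instance (beg1 : Int) (beg2 : Int) (seq1 : String) (seq2 : String) (out : List (Int × Int × Int)) : Decidable (Spec_mafBlocks beg1 beg2 seq1 seq2 out) := by unfold Spec_mafBlocks; infer_instance

-- ===== CLAIM (what is proved, stated in full; the proofs are below) =====
def Claim_equal_mafBlocks : Prop := ∀ (beg1 : Int) (beg2 : Int) (seq1 : String) (seq2 : String), Dom_mafBlocks beg1 beg2 seq1 seq2 → Spec_mafBlocks beg1 beg2 seq1 seq2 (mafBlocks beg1 beg2 seq1 seq2)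

-- ===== LEMMAS AND PROOFS =====

theorem pvKey_true {p : Char × Char} (h : pvKey p = true) : p.1 ≠ '-' ∧ p.2 ≠ '-' := by
  simpa [pvKey] using h

theorem pvKey_false {p : Char × Char} (h : pvKey p = false) : p.1 = '-' ∨ p.2 = '-' := by
  by_cases h1 : p.1 = '-'
  · exact Or.inl h1
  · by_cases h2 : p.2 = '-'
    · exact Or.inr h2
    · simp [pvKey, h1, h2] at h

-- head of a dropWhile result fails the predicate
theorem dropWhile_head_false {α : Type} (p : α → Bool) :
    ∀ (l : List α) {q : α} {t : List α}, l.dropWhile p = q :: t → p q = false := by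
  intro l
  induction l with
  | nil => intro q t h; simp [List.dropWhile] at h
  | cons a l ih =>
    intro q t h
    by_cases ha : p a = true
    · rw [List.dropWhile_cons_of_pos ha] at h; exact ih h
    · rw [List.dropWhile_cons_of_neg ha] at h
      cases h; simpa using ha

-- L1: a gapless run is absorbed into the size accumulator
theorem goA_match (run : List (Char × Char)) (hk : ∀ p ∈ run, pvKey p = true) :
    ∀ (rest : List (Char × Char)) (b1 b2 s : Int),
      pvGoA b1 b2 s (run ++ rest) = pvGoA b1 b2 (s + run.length) rest := by
  induction run with
  | nil => intro rest b1 b2 s; simp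
  | cons p t ih =>
    intro rest b1 b2 s
    obtain ⟨h1, h2⟩ := pvKey_true (hk p (by simp))
    obtain ⟨x, y⟩ := p
    have := ih (fun q hq => hk q (by simp [hq]))
    simp only [List.cons_append, pvGoA, if_neg h1, if_neg h2, this, List.length_cons]
    push_cast
    ring_nf

-- L2: with a nonzero accumulator and a run boundary ahead, A flushes one block
theorem goA_flush (rest : List (Char × Char)) (b1 b2 s : Int) (hs : s ≠ 0)
    (hb : rest = [] ∨ ∃ q t, rest = q :: t ∧ pvKey q = false) :
    pvGoA b1 b2 s rest = (b1, b2, s) :: pvGoA (b1 + s) (b2 + s) 0 rest := by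
  rcases hb with h | ⟨q, t, rfl, hq⟩
  · subst h; simp [pvGoA, hs]
  · obtain ⟨x, y⟩ := q
    rcases pvKey_false hq with h1 | h2
    · simp only at h1; subst h1
      simp [pvGoA, hs]
    · simp only at h2; subst h2
      by_cases h1 : x = '-'
      · subst h1; simp [pvGoA, hs]
      · simp [pvGoA, hs, h1]

-- L3: with zero accumulator, a gapped run only advances the begins
theorem goA_gap (run : List (Char × Char)) (hk : ∀ p ∈ run, pvKey p = false) :
    ∀ (rest : List (Char × Char)) (b1 b2 : Int),
      pvGoA b1 b2 0 (run ++ rest) =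
        pvGoA (b1 + ((run.length : Int) - (run.countP (fun q => q.1 == '-') : Int)))
              (b2 + (run.countP (fun q => q.1 == '-') : Int)) 0 rest := by
  induction run with
  | nil => intro rest b1 b2; simp
  | cons p t ih =>
    intro rest b1 b2
    have hp := pvKey_false (hk p (by simp))
    have iht := ih (fun q hq => hk q (by simp [hq]))
    obtain ⟨x, y⟩ := p
    by_cases h1 : x = '-'
    · subst h1
      have hstep : pvGoA b1 b2 0 (('-', y) :: (t ++ rest)) = pvGoA b1 (b2 + 1) 0 (t ++ rest) := by
        simp [pvGoA]
      rw [List.cons_append, hstep, iht]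
      have e1 : b1 + ((↑t.length : Int) - ↑(t.countP fun q => q.1 == '-'))
          = b1 + ((↑(List.length (('-', y) :: t)) : Int) - ↑(List.countP (fun q => q.1 == '-') (('-', y) :: t))) := by
        simp
      have e2 : b2 + 1 + (↑(t.countP fun q => q.1 == '-') : Int)
          = b2 + (↑(List.countP (fun q => q.1 == '-') (('-', y) :: t)) : Int) := by
        simp
        ring
      rw [e1, e2]
    · rcases hp with h | h2
      · exact absurd h h1
      · simp only at h2; subst h2
        have hstep : pvGoA b1 b2 0 ((x, '-') :: (t ++ rest)) = pvGoA (b1 + 1) b2 0 (t ++ rest) := by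
          simp [pvGoA, h1]
        rw [List.cons_append, hstep, iht]
        have e1 : b1 + 1 + ((↑t.length : Int) - ↑(t.countP fun q => q.1 == '-'))
            = b1 + ((↑(List.length ((x, '-') :: t)) : Int) - ↑(List.countP (fun q => q.1 == '-') ((x, '-') :: t))) := by
          simp [h1]
          push_cast
          ring
        have e2 : b2 + (↑(t.countP fun q => q.1 == '-') : Int)
            = b2 + (↑(List.countP (fun q => q.1 == '-') ((x, '-') :: t)) : Int) := by
          simp [h1]
        rw [e1, e2]

-- main equivalence of the two loop bodies, by strong induction on the column list
theorem goA_eq_goB : ∀ (n : Nat) (l : List (Char × Char)), l.length ≤ n →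
    ∀ (b1 b2 : Int), pvGoA b1 b2 0 l = pvGoB b1 b2 l := by
  intro n
  induction n with
  | zero =>
    intro l hl b1 b2
    have : l = [] := List.eq_nil_of_length_eq_zero (Nat.le_zero.mp hl)
    subst this; simp [pvGoA, pvGoB]
  | succ n ih =>
    intro l hl b1 b2
    match l with
    | [] => simp [pvGoA, pvGoB]
    | p :: t =>
      by_cases hp : pvKey p = true
      · -- gapless run
        set run := p :: t.takeWhile pvKey with hrun
        have hsplit : p :: t = run ++ t.dropWhile pvKey := by
          simp [hrun, List.takeWhile_append_dropWhile]
        have hall : ∀ q ∈ run, pvKey q = true := by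
          intro q hq
          rcases List.mem_cons.mp hq with rfl | hq
          · exact hp
          · exact List.mem_takeWhile_imp hq
        have hrest : t.dropWhile pvKey = [] ∨
            ∃ q t', t.dropWhile pvKey = q :: t' ∧ pvKey q = false := by
          cases hd : t.dropWhile pvKey with
          | nil => exact Or.inl rfl
          | cons q t' => exact Or.inr ⟨q, t', rfl, dropWhile_head_false _ _ hd⟩
        have hlen : (t.dropWhile pvKey).length ≤ n :=
          le_trans (List.length_dropWhile_le _ _) (Nat.le_of_succ_le_succ hl)
        have hne : ((run.length : Int)) ≠ 0 := by
          simp [hrun]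
          positivity
        rw [hsplit, goA_match run hall, zero_add,
          goA_flush _ _ _ _ hne hrest, ih _ hlen]
        simp [pvGoB, hp, hrun]
      · -- gapped run
        have hp' : pvKey p = false := by simpa using hp
        set run := p :: t.takeWhile (fun q => !pvKey q) with hrun
        have hsplit : p :: t = run ++ t.dropWhile (fun q => !pvKey q) := by
          simp [hrun, List.takeWhile_append_dropWhile]
        have hall : ∀ q ∈ run, pvKey q = false := by
          intro q hq
          rcases List.mem_cons.mp hq with rfl | hq
          · exact hp'
          · simpa using List.mem_takeWhile_imp hq
        have hlen : (t.dropWhile (fun q => !pvKey q)).length ≤ n :=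
          le_trans (List.length_dropWhile_le _ _) (Nat.le_of_succ_le_succ hl)
        rw [hsplit, goA_gap run hall, ih _ hlen]
        simp [pvGoB, hp', hrun]

-- ===== VERDICT (by name: the statement is the Claim_ definition above) =====
theorem mafBlocks_spec : Claim_equal_mafBlocks := by
  intro beg1 beg2 seq1 seq2 _
  unfold Spec_mafBlocks mafBlocks mafBlocks_alt
  exact goA_eq_goB _ _ le_rfl _ _
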